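-- pv_equiv track=rewrite | github.com/GameModes/oldDataIntensive | SparkRouteSolution.py | linear_payments
-- ===== SOURCE A (Python) =====
-- def knapsack(costs, budget):
--     n = len(costs)
--     dp = [[0] * (budget + 1) for _ in range(n + 1)]
--
--     # fill in matrix
--     for i in range(1, n + 1):
--         for j in range(1, budget + 1):
--             if costs[i - 1] <= j:
--                 dp[i][j] = max(dp[i - 1][j], dp[i - 1][j - costs[i - 1]] + costs[i - 1])
--             else:
--                 dp[i][j] = dp[i - 1][j]
--
--     # select optimal indices
--     indices = []
--     i, j = n, budget
--     while i > 0 and j > 0: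
--         if dp[i][j] != dp[i - 1][j]:
--             indices.append(i - 1)
--             j -= costs[i - 1]
--         i -= 1
--
--     # remove optimal indices backwards
--     for index in sorted(indices, reverse=True):
--         if index < len(costs):
--             costs.pop(index)
--
--     return costs, indices, budget - dp[n][budget]
--
-- def linear_payments(costs):
--     remaining_budget = 495000
--
--     for cost in costs.copy():
--         if cost in costs:
--             if cost <= remaining_budget:
--                 remaining_budget -= cost
--                 costs.remove(cost)
--             else:
--                 break
--
--     costs, indices, penalty = knapsack(costs, 5000 + remaining_budget)
--
--     return costs, indices, penalty
-- ===== SOURCE B (Python) =====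
-- def linear_payments(costs):
--     # greedy prefix: consume costs in order while they fit the remaining budget
--     rem = 495000
--     k = 0
--     while k < len(costs) and costs[k] <= rem:
--         rem -= costs[k]
--         k += 1
--     rest = costs[k:]
--     budget = 5000 + rem
--     n = len(rest)
--     # reachable subset sums (capped at budget) of each prefix of rest
--     reachs = [{0}]
--     prev = {0}
--     for c in rest:
--         prev = prev | {s + c for s in prev if s + c <= budget}
--         reachs.append(prev)
--
--     def best(i, j):
--         return max((s for s in reachs[i] if s <= j), default=0)
--
--     indices = []
--     i, j = n, budget
--     while i > 0 and j > 0: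
--         if best(i, j) != best(i - 1, j):
--             indices.append(i - 1)
--             j -= rest[i - 1]
--         i -= 1
--     out = list(rest)
--     for t in indices:  # indices is strictly decreasing, so each del is valid
--         del out[t]
--     costs[:] = out  # mirror A's in-place mutation of costs
--     return costs, indices, budget - best(n, budget)
-- ===== Notes on version B (the rewrite author's own statement) =====
-- stated objective: faster
-- what changed: Replaces A's dense (n+1)x(budget+1) bottom-up DP table (budget is ~500000) by the set of reachable subset sums of each prefix capped at the budget (usually far smaller), replaces the copy/remove greedy by an index scan, and drops the redundant sort/guard in the removal loop; the backtrack queries max-of-reachable-sums instead of the table.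
import Mathlib
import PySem

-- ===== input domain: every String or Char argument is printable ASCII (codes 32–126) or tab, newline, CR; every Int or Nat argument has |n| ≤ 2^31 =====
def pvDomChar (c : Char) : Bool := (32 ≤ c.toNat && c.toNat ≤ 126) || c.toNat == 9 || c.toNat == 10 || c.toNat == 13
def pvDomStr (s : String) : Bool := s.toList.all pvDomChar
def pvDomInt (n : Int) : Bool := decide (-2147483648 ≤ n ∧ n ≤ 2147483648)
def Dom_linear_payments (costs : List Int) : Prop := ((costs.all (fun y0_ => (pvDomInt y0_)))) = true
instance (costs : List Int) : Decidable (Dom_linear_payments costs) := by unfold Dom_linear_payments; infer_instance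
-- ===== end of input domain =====

-- B replaces A's dense (n+1)×(budget+1) DP table by the set of reachable subset sums of each
-- prefix (capped at the budget), and A's copy/remove greedy by an index scan; A mutates its
-- argument in place (greedy remove + pops) — the equivalence proved here is about the RETURN
-- value (B's Python mirrors the mutation; the Lean ports are pure).

-- ===== PORT A =====
-- greedy loop of linear_payments: 'for cost in costs.copy(): …' — first argument is the copy
-- being iterated, second the mutating costs list; break returns the current state.
def pvGreedyA : List Int → List Int → Int → List Int × Int
  | [], costs, rem => (costs, rem)
  | c :: rest, costs, rem =>
    if costs.contains c then
      if c ≤ rem then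
        -- 'costs.remove(cost)': present because of the contains-guard, so getD is never taken
        pvGreedyA rest ((PySem.List.remove? costs c).getD costs) (rem - c)
      else (costs, rem)
    else pvGreedyA rest costs rem

-- dp[i][j] read; indices are in range on every admitted input (Pre_: costs reaching the
-- knapsack are nonnegative), so the defaults are never taken
def pvDget (dp : Array (Array Int)) (i : Nat) (jn : Nat) : Int := (dp.getD i #[]).getD jn 0

-- the two nested 'for' loops filling dp (rows as Arrays, Array.modify = the in-place update)
def pvFillA (cs : List Int) (budget : Int) : Array (Array Int) :=
  let n : Int := cs.length
  let dp0 : Array (Array Int) := Array.replicate (n.toNat+1) (Array.replicate (budget+1).toNat 0)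
  (PySem.List.pyRange 1 (n+1)).foldl (fun dp i =>
    (PySem.List.pyRange 1 (budget+1)).foldl (fun dp j =>
      let c := PySem.List.pyGetD cs (i-1) 0
      let v := if c ≤ j then
          max (pvDget dp (i-1).toNat j.toNat) (pvDget dp (i-1).toNat (j-c).toNat + c)
        else pvDget dp (i-1).toNat j.toNat
      dp.modify i.toNat (fun row => row.set! j.toNat v)) dp) dp0

-- 'while i > 0 and j > 0: …; i -= 1' ported as recursion on i (the Nat i here is Python's i)
def pvBackA (dp : Array (Array Int)) (cs : List Int) : Nat → Int → List Int → List Int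
  | 0, _, acc => acc
  | i+1, j, acc =>
    if j > 0 then
      if pvDget dp (i+1) j.toNat ≠ pvDget dp i j.toNat then
        pvBackA dp cs i (j - PySem.List.pyGetD cs (i : Int) 0) (acc ++ [(i : Int)])
      else pvBackA dp cs i j acc
    else acc

def pvKnapA (costs0 : List Int) (budget : Int) : List Int × List Int × Int :=
  let n : Int := costs0.length
  let dp := pvFillA costs0 budget
  let indices := pvBackA dp costs0 n.toNat budget []
  let costs := (PySem.List.sorted indices (fun x => x) true).foldl
      (fun cs idx => if idx < (cs.length : Int) then
          (((PySem.List.pop? cs idx).map (·.2)).getD cs) else cs) costs0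
  (costs, indices, budget - pvDget dp n.toNat budget.toNat)

def linear_payments (costs : List Int) : List Int × List Int × Int :=
  let g := pvGreedyA costs costs 495000
  pvKnapA g.1 (5000 + g.2)

-- ===== PORT B =====
-- 'while k < len(costs) and costs[k] <= rem: …' index scan
def pvGloopB (costs : List Int) (k : Nat) (rem : Int) : Nat × Int :=
  if h : k < costs.length then
    if costs[k] ≤ rem then pvGloopB costs (k+1) (rem - costs[k]) else (k, rem)
  else (k, rem)
termination_by costs.length - k

-- the reachs list and the running prev set ('prev = prev | {s + c for s in prev if s + c <= budget}')
def pvReachsB (rest : List Int) (budget : Int) : List (PySem.Set Int) × PySem.Set Int :=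
  rest.foldl (fun st c =>
      let nxt := PySem.Set.union st.2 ((st.2.filter (fun s => s + c ≤ budget)).map (fun s => s + c))
      (st.1 ++ [nxt], nxt))
    ([PySem.Set.ofList [0]], PySem.Set.ofList [0])

-- best(i, j) = max((s for s in reachs[i] if s <= j), default=0): a max of Ints over a set,
-- independent of the set's iteration order
def pvBestB (reachs : List (PySem.Set Int)) (i : Int) (j : Int) : Int :=
  (((PySem.List.pyGetD reachs i []).filter (fun s => s ≤ j)).max?).getD 0

-- the same backtrack as A's, querying best instead of the table (recursion on Python's i)
def pvBackB (reachs : List (PySem.Set Int)) (rest : List Int) : Nat → Int → List Int → List Int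
  | 0, _, acc => acc
  | i+1, j, acc =>
    if j > 0 then
      if pvBestB reachs ((i : Int)+1) j ≠ pvBestB reachs (i : Int) j then
        pvBackB reachs rest i (j - PySem.List.pyGetD rest (i : Int) 0) (acc ++ [(i : Int)])
      else pvBackB reachs rest i j acc
    else acc

def linear_payments_alt (costs : List Int) : List Int × List Int × Int :=
  let g := pvGloopB costs 0 495000
  let rest := costs.drop g.1           -- costs[k:], k ≥ 0
  let budget := 5000 + g.2
  let n : Nat := rest.length
  let reachs := (pvReachsB rest budget).1
  let indices := pvBackB reachs rest n budget []
  -- 'for t in indices: del out[t]' — indices is strictly decreasing, so t is always in range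
  -- and the pop is a some; the getD default is never taken
  let out := indices.foldl (fun cs t => ((PySem.List.pop? cs t).map (·.2)).getD cs) rest
  (out, indices, budget - pvBestB reachs (n : Int) budget)

-- ===== PRECONDITION & SPEC =====
-- Pre_ excludes exactly the inputs on which a NEGATIVE cost survives the greedy prefix (sits at
-- or after the first position whose cost exceeds the remaining budget, stated via prefix sums):
-- there A's dp fill indexes dp[i-1][j - cost] past the row end and raises IndexError.
def Pre_linear_payments (costs : List Int) : Prop :=
  ∀ k, (hk : k < costs.length) → costs[k] < 0 →
    ∀ m, (hm : m < costs.length) → m ≤ k → costs[m] ≤ 495000 - ((costs.take m).sum)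
instance (costs : List Int) : Decidable (Pre_linear_payments costs) := by
  unfold Pre_linear_payments; infer_instance

def pvWitness_linear_payments : List Int := [1, 2, 3]

def Spec_linear_payments (costs : List Int) (out : List Int × List Int × Int) : Prop := out = linear_payments_alt costs
instance (costs : List Int) (out : List Int × List Int × Int) : Decidable (Spec_linear_payments costs out) := by unfold Spec_linear_payments; infer_instance

-- ===== CLAIM (what is proved, stated in full; the proofs are below) =====
def Claim_equal_linear_payments : Prop := ∀ (costs : List Int), Dom_linear_payments costs → Pre_linear_payments costs → Spec_linear_payments costs (linear_payments costs)

-- ===== LEMMAS AND PROOFS =====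

-- the greedy scan both ports compute (proof-side description)
def pvScan : List Int → Int → List Int × Int
  | [], rem => ([], rem)
  | c :: t, rem => if c ≤ rem then pvScan t (rem - c) else (c :: t, rem)

-- the shared DP value: max subset sum of the first i costs that fits in j
def pvM (cs : List Int) : Nat → Int → Int
  | 0, _ => 0
  | i+1, j =>
    let c := cs.getD i 0
    if c ≤ j then max (pvM cs i j) (pvM cs i (j - c) + c) else pvM cs i j

theorem pvGreedyA_eq_scan (cs : List Int) (rem : Int) : pvGreedyA cs cs rem = pvScan cs rem := by
  induction cs generalizing rem with
  | nil => rfl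
  | cons c t ih =>
    simp only [pvGreedyA, pvScan, List.contains_cons, BEq.rfl, Bool.true_or, if_true,
      PySem.List.remove?_cons_self, Option.getD_some]
    split <;> simp [ih]

theorem pvGloopB_aux (cs : List Int) (k : Nat) (rem : Int) :
    (cs.drop (pvGloopB cs k rem).1, (pvGloopB cs k rem).2) = pvScan (cs.drop k) rem := by
  rw [pvGloopB]
  by_cases h : k < cs.length
  · have hd : cs.drop k = cs[k] :: cs.drop (k+1) := List.drop_eq_getElem_cons h
    by_cases hle : cs[k] ≤ rem
    · simp only [h, dif_pos, hle, if_pos]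
      rw [pvGloopB_aux cs (k+1) (rem - cs[k])]
      rw [hd]; simp [pvScan, hle]
    · simp only [h, dif_pos, hle, if_neg]
      rw [hd]; simp [pvScan, hle]
  · have : cs.length ≤ k := Nat.le_of_not_lt h
    simp only [h, dif_neg, not_false_iff]
    simp [List.drop_eq_nil_of_le this, pvScan]
termination_by cs.length - k

theorem pvScan_rem_nonneg (cs : List Int) (rem : Int) (h : 0 ≤ rem) :
    0 ≤ (pvScan cs rem).2 := by
  induction cs generalizing rem with
  | nil => exact h
  | cons c t ih =>
    simp only [pvScan]
    split
    · exact ih _ (by omega)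
    · exact h

theorem pvScan_rest_nonneg_aux (costs : List Int) (base : Int) (h : ∀ k, (hk : k < costs.length) → costs[k] < 0 →
      ∀ m, (hm : m < costs.length) → m ≤ k → costs[m] ≤ base - ((costs.take m).sum)) :
    ∀ c ∈ (pvScan costs base).1, 0 ≤ c := by
  induction costs generalizing base with
  | nil => intro c hc; simp [pvScan] at hc
  | cons c t ih =>
    by_cases hle : c ≤ base
    · simp only [pvScan, hle, if_pos]
      apply ih
      intro k hk hneg m hm hmk
      have := h (k+1) (by simpa using hk) (by simpa using hneg) (m+1) (by simpa using hm) (by omega)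
      simpa [List.take_succ_cons, add_comm, sub_sub] using this
    · simp only [pvScan, hle, if_neg, not_false_iff]
      intro x hx
      by_contra hneg
      push_neg at hneg
      obtain ⟨k, hk, rfl⟩ := List.mem_iff_getElem.mp hx
      have := h k hk hneg 0 (by omega) (by omega)
      simp at this
      omega

theorem pvBackB_acc (reachs : List (PySem.Set Int)) (rest : List Int) (i : Nat) (j : Int)
    (acc : List Int) : pvBackB reachs rest i j acc = acc ++ pvBackB reachs rest i j [] := by
  induction i generalizing j acc with
  | zero => simp [pvBackB]
  | succ i ih =>
    simp only [pvBackB]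
    split
    · split
      · rw [ih _ (acc ++ [(i:Int)]), ih _ ([] ++ [(i:Int)])]
        simp
      · rw [ih _ acc]
    · simp

theorem pvBackB_shape (reachs : List (PySem.Set Int)) (rest : List Int) (i : Nat) (j : Int) :
    (∀ x ∈ pvBackB reachs rest i j [], 0 ≤ x ∧ x < (i : Int)) ∧
      (pvBackB reachs rest i j []).Pairwise (· > ·) := by
  induction i generalizing j with
  | zero => simp [pvBackB]
  | succ i ih =>
    simp only [pvBackB]
    split
    · split
      · rw [pvBackB_acc]
        constructor
        · intro x hx
          rcases List.mem_append.mp hx with h | h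
          · simp at h; omega
          · have := (ih _).1 x h; push_cast; omega
        · rw [List.pairwise_append]
          refine ⟨by simp, (ih _).2, ?_⟩
          intro a ha b hb
          simp at ha; subst ha
          have := (ih _).1 b hb
          omega
      · refine ⟨fun x hx => ?_, (ih j).2⟩
        have := (ih j).1 x hx; push_cast; omega
    · simp

theorem pvSorted_rev_indices (l : List Int) (hl : l.Pairwise (· > ·)) :
    PySem.List.sorted l (fun x => x) true = l := by
  apply PySem.List.sorted_rev_eq_self_of_pairwise
  exact hl.imp (by intro a b h; exact le_of_lt h)

theorem pvPops_eq (l : List Int) (cs : List Int)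
    (hl : l.Pairwise (· > ·)) (hin : ∀ x ∈ l, 0 ≤ x ∧ x < (cs.length : Int)) :
    l.foldl (fun cs idx => if idx < (cs.length : Int) then
        (((PySem.List.pop? cs idx).map (·.2)).getD cs) else cs) cs
      = l.foldl (fun cs t => ((PySem.List.pop? cs t).map (·.2)).getD cs) cs := by
  induction l generalizing cs with
  | nil => rfl
  | cons x t ih =>
    have hx := hin x (by simp)
    have hxn : x = ((x.toNat : Nat) : Int) := by omega
    have hlt : x.toNat < cs.length := by omega
    have hpop : PySem.List.pop? cs x = some (cs[x.toNat], cs.eraseIdx x.toNat) := by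
      have := PySem.List.pop?_natCast cs x.toNat hlt
      rw [← hxn] at this; exact this
    have hlen : (cs.eraseIdx x.toNat).length = cs.length - 1 := by
      rw [List.length_eraseIdx_of_lt hlt]
    simp only [List.foldl_cons, if_pos hx.2, hpop, Option.map_some, Option.getD_some]
    refine ih _ (hl.sublist (List.sublist_cons_self x t)) (fun y hy => ?_)
    have h1 := hin y (List.mem_cons_of_mem x hy)
    have h2 := (List.pairwise_cons.mp hl).1 y hy
    constructor
    · exact h1.1
    · rw [hlen]; omega

-- proof-side pure description of the reachs chain
def pvStep (budget : Int) (prev : PySem.Set Int) (c : Int) : PySem.Set Int :=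
  PySem.Set.union prev ((prev.filter (fun s => s + c ≤ budget)).map (fun s => s + c))

def pvR (cs : List Int) (budget : Int) : Nat → PySem.Set Int
  | 0 => PySem.Set.ofList [0]
  | i+1 => pvStep budget (pvR cs budget i) (cs.getD i 0)

theorem pvReachsB_eq (rest : List Int) (budget : Int) :
    pvReachsB rest budget
      = ((List.range (rest.length+1)).map (pvR rest budget), pvR rest budget rest.length) := by
  suffices h : ∀ (suf pre : List Int), pre ++ suf = rest →
      suf.foldl (fun st c =>
        ((st.1 ++ [PySem.Set.union st.2 ((st.2.filter (fun s => s + c ≤ budget)).map (fun s => s + c))]),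
          PySem.Set.union st.2 ((st.2.filter (fun s => s + c ≤ budget)).map (fun s => s + c))))
        ((List.range (pre.length+1)).map (pvR rest budget), pvR rest budget pre.length)
      = ((List.range (rest.length+1)).map (pvR rest budget), pvR rest budget rest.length) by
    have h0 := h rest [] rfl
    simpa [pvReachsB, pvR] using h0
  intro suf
  induction suf with
  | nil => intro pre hpre; simp at hpre; subst hpre; simp
  | cons c suf ih =>
    intro pre hpre
    have hc : rest[pre.length]?.getD 0 = c := by
      subst hpre
      simp [List.getElem?_append_right (Nat.le_refl pre.length)]
    have hstep : PySem.Set.union (pvR rest budget pre.length)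
        (((pvR rest budget pre.length).filter (fun s => s + c ≤ budget)).map (fun s => s + c))
        = pvR rest budget (pre.length + 1) := by
      simp [pvR, pvStep, hc]
    have hrange : (List.range (pre.length+1)).map (pvR rest budget) ++ [pvR rest budget (pre.length+1)]
        = (List.range (pre.length+1+1)).map (pvR rest budget) := by
      rw [List.range_succ (n := pre.length+1), List.range_succ (n := pre.length)]; simp
    simp only [List.foldl_cons]
    have := ih (pre ++ [c]) (by simpa using hpre)
    simpa [hstep, hrange] using this

def pvMF (l : List Int) (j : Int) : Int := ((l.filter (fun s => s ≤ j)).max?).getD 0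

theorem pvGetD_nonneg (cs : List Int) (hc : ∀ c ∈ cs, 0 ≤ c) (i : Nat) : 0 ≤ cs.getD i 0 := by
  rw [List.getD_eq_getElem?_getD]
  cases h : cs[i]? with
  | none => simp
  | some v => simpa using hc v (List.mem_of_getElem? h)

theorem pvM_nonneg (cs : List Int) (hc : ∀ c ∈ cs, 0 ≤ c) (i : Nat) (j : Int) (hj : 0 ≤ j) :
    0 ≤ pvM cs i j := by
  induction i generalizing j with
  | zero => simp [pvM]
  | succ i ih =>
    simp only [pvM]
    split
    · exact le_trans (ih j hj) (le_max_left _ _)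
    · exact ih j hj

theorem pvM_le (cs : List Int) (hc : ∀ c ∈ cs, 0 ≤ c) (i : Nat) (j : Int) (hj : 0 ≤ j) :
    pvM cs i j ≤ j := by
  induction i generalizing j with
  | zero => simpa [pvM]
  | succ i ih =>
    simp only [pvM]
    split
    · rename_i h
      have hcn := pvGetD_nonneg cs hc i
      refine max_le (ih j hj) ?_
      have := ih (j - cs.getD i 0) (by omega)
      omega
    · exact ih j hj

theorem pvM_zero (cs : List Int) (hc : ∀ c ∈ cs, 0 ≤ c) (i : Nat) : pvM cs i 0 = 0 :=
  le_antisymm (pvM_le cs hc i 0 le_rfl) (pvM_nonneg cs hc i 0 le_rfl)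

theorem pvMF_spec (l : List Int) (j : Int) (h0 : (0:Int) ∈ l) (hj : 0 ≤ j) :
    pvMF l j ∈ l ∧ pvMF l j ≤ j ∧ ∀ s ∈ l, s ≤ j → s ≤ pvMF l j := by
  have h0f : (0:Int) ∈ l.filter (fun s => s ≤ j) := by
    simp [List.mem_filter, h0, hj]
  cases hm : (l.filter (fun s => s ≤ j)).max? with
  | none =>
    rw [List.max?_eq_none_iff] at hm
    rw [hm] at h0f; simp at h0f
  | some m =>
    obtain ⟨hmem, hub⟩ := List.max?_eq_some_iff.mp hm
    have := List.mem_filter.mp hmem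
    refine ⟨by simpa [pvMF, hm] using this.1, by simpa [pvMF, hm] using of_decide_eq_true this.2, ?_⟩
    intro s hs hsj
    have : s ∈ l.filter (fun s => s ≤ j) := by simp [List.mem_filter, hs, hsj]
    simpa [pvMF, hm] using hub s this

theorem pvMF_eq_of_spec (l : List Int) (j v : Int) (h0 : (0:Int) ∈ l) (hj : 0 ≤ j)
    (hv : v ∈ l ∧ v ≤ j ∧ ∀ s ∈ l, s ≤ j → s ≤ v) : pvMF l j = v := by
  obtain ⟨h1, h2, h3⟩ := pvMF_spec l j h0 hj
  exact le_antisymm (hv.2.2 _ h1 h2) (h3 v hv.1 hv.2.1)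

theorem pvR_mem_succ (cs : List Int) (budget : Int) (i : Nat) (s : Int) :
    s ∈ pvR cs budget (i+1) ↔
      s ∈ pvR cs budget i ∨
        ∃ s' ∈ pvR cs budget i, s' + cs.getD i 0 ≤ budget ∧ s = s' + cs.getD i 0 := by
  simp only [pvR, pvStep, PySem.Set.mem_union, List.mem_map, List.mem_filter]
  constructor
  · rintro (h | ⟨s', ⟨hs', hle⟩, rfl⟩)
    · exact Or.inl h
    · exact Or.inr ⟨s', hs', of_decide_eq_true hle, rfl⟩
  · rintro (h | ⟨s', hs', hle, rfl⟩)
    · exact Or.inl h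
    · exact Or.inr ⟨s', ⟨hs', decide_eq_true hle⟩, rfl⟩

theorem pvR_inv (cs : List Int) (budget : Int) (hb : 0 ≤ budget) (hc : ∀ c ∈ cs, 0 ≤ c) (i : Nat) :
    ((0:Int) ∈ pvR cs budget i) ∧ (∀ s ∈ pvR cs budget i, 0 ≤ s ∧ s ≤ budget) ∧
      (∀ j, 0 ≤ j → j ≤ budget → pvMF (pvR cs budget i) j = pvM cs i j) := by
  induction i with
  | zero =>
    refine ⟨by simp [pvR, PySem.Set.mem_ofList], ?_, ?_⟩
    · intro s hs
      simp [pvR, PySem.Set.mem_ofList] at hs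
      omega
    · intro j hj hjb
      apply pvMF_eq_of_spec _ _ _ (by simp [pvR, PySem.Set.mem_ofList]) hj
      have h00 : pvM cs 0 j = 0 := rfl
      rw [h00]
      refine ⟨by simp [pvR, PySem.Set.mem_ofList], hj, ?_⟩
      intro s hs hsj
      simp [pvR, PySem.Set.mem_ofList] at hs
      omega
  | succ i ih =>
    obtain ⟨ih0, ihb, ihm⟩ := ih
    have hcn : 0 ≤ cs.getD i 0 := pvGetD_nonneg cs hc i
    have h0' : (0:Int) ∈ pvR cs budget (i+1) := (pvR_mem_succ _ _ _ _).mpr (Or.inl ih0)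
    refine ⟨h0', ?_, ?_⟩
    · intro s hs
      rcases (pvR_mem_succ _ _ _ _).mp hs with h | ⟨s', hs', hle, rfl⟩
      · exact ihb s h
      · have := ihb s' hs'
        omega
    · intro j hj hjb
      have hMsucc : ∀ j', pvM cs (i+1) j' = if cs.getD i 0 ≤ j' then
          max (pvM cs i j') (pvM cs i (j' - cs.getD i 0) + cs.getD i 0) else pvM cs i j' :=
        fun _ => rfl
      set c := cs.getD i 0 with hcdef
      apply pvMF_eq_of_spec _ _ _ h0' hj
      by_cases hcj : c ≤ j
      · have hj' : 0 ≤ j - c := by omega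
        have hjb' : j - c ≤ budget := by omega
        have hMympre := ihm (j - c) hj' hjb'
        have hMym := pvMF_spec (pvR cs budget i) (j - c) ih0 hj'
        rw [hMympre] at hMym
        have hMj := pvMF_spec (pvR cs budget i) j ih0 hj
        rw [ihm j hj hjb] at hMj
        have hMeq : pvM cs (i+1) j = max (pvM cs i j) (pvM cs i (j - c) + c) := by
          rw [hMsucc, if_pos hcj]
        rw [hMeq]
        refine ⟨?_, ?_, ?_⟩
        · rcases max_choice (pvM cs i j) (pvM cs i (j - c) + c) with h | h <;> rw [h]
          · exact (pvR_mem_succ _ _ _ _).mpr (Or.inl hMj.1)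
          · refine (pvR_mem_succ _ _ _ _).mpr (Or.inr ⟨pvM cs i (j - c), hMym.1, ?_, rfl⟩)
            have := hMym.2.1
            omega
        · have := hMym.2.1
          refine max_le hMj.2.1 (by omega)
        · intro s hs hsj
          rcases (pvR_mem_succ _ _ _ _).mp hs with h | ⟨s', hs', hle, rfl⟩
          · exact le_trans (hMj.2.2 s h hsj) (le_max_left _ _)
          · have hs'le : s' ≤ j - c := by omega
            have := hMym.2.2 s' hs' hs'le
            have : s' + c ≤ pvM cs i (j - c) + c := by omega
            exact le_trans this (le_max_right _ _)
      · have hMeq : pvM cs (i+1) j = pvM cs i j := by rw [hMsucc, if_neg hcj]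
        rw [hMeq]
        have hMj := pvMF_spec (pvR cs budget i) j ih0 hj
        rw [ihm j hj hjb] at hMj
        refine ⟨(pvR_mem_succ _ _ _ _).mpr (Or.inl hMj.1), hMj.2.1, ?_⟩
        intro s hs hsj
        rcases (pvR_mem_succ _ _ _ _).mp hs with h | ⟨s', hs', hle, rfl⟩
        · exact hMj.2.2 s h hsj
        · have := (ihb s' hs').1
          omega

-- the invariant during the fill
def pvTab (cs : List Int) (budget : Int) (t : Nat) (dp : Array (Array Int)) : Prop :=
  dp.size = cs.length + 1 ∧
  (∀ r, (hr : r < dp.size) → dp[r].size = budget.toNat + 1) ∧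
  (∀ r, r ≤ t → r ≤ cs.length → ∀ jn, jn ≤ budget.toNat → pvDget dp r jn = pvM cs r (jn : Int)) ∧
  (∀ r, t < r → r ≤ cs.length → ∀ jn, pvDget dp r jn = 0)

theorem pvDget_eq_getElem (dp : Array (Array Int)) (r jn : Nat) (hr : r < dp.size)
    (hj : jn < dp[r].size) : pvDget dp r jn = dp[r][jn] := by
  unfold pvDget
  have h1 : dp.getD r #[] = dp[r] := by
    rw [Array.getD_eq_getD_getElem?, Array.getElem?_eq_getElem hr, Option.getD_some]
  rw [h1, Array.getD_eq_getD_getElem?, Array.getElem?_eq_getElem hj, Option.getD_some]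

-- one inner-loop step writes pvM cs (t+1) j into row t+1 at column j
theorem pvInner_step (cs : List Int) (budget : Int) (hb : 0 ≤ budget)
    (hc : ∀ c ∈ cs, 0 ≤ c) (t : Nat) (ht : t < cs.length) (dp0 dp : Array (Array Int))
    (h0 : pvTab cs budget t dp0)
    (hsz : dp.size = cs.length + 1)
    (hrsz : ∀ r, (hr : r < dp.size) → dp[r].size = budget.toNat + 1)
    (hother : ∀ r, r ≠ t + 1 → ∀ jn, pvDget dp r jn = pvDget dp0 r jn)
    (u : Nat) (hu : u < budget.toNat)
    (hrow : ∀ jn, jn ≤ budget.toNat →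
      pvDget dp (t+1) jn = if 1 ≤ jn ∧ jn ≤ u then pvM cs (t+1) (jn : Int) else 0) :
    let i : Int := ((t : Int) + 1)
    let j : Int := ((u : Int) + 1)
    let c := PySem.List.pyGetD cs (i-1) 0
    let v := if c ≤ j then
        max (pvDget dp (i-1).toNat j.toNat) (pvDget dp (i-1).toNat (j-c).toNat + c)
      else pvDget dp (i-1).toNat j.toNat
    let dp' := dp.modify i.toNat (fun row => row.set! j.toNat v)
    dp'.size = cs.length + 1 ∧
    (∀ r, (hr : r < dp'.size) → dp'[r].size = budget.toNat + 1) ∧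
    (∀ r, r ≠ t + 1 → ∀ jn, pvDget dp' r jn = pvDget dp0 r jn) ∧
    (∀ jn, jn ≤ budget.toNat →
      pvDget dp' (t+1) jn = if 1 ≤ jn ∧ jn ≤ u + 1 then pvM cs (t+1) (jn : Int) else 0) := by
  intro i j c v dp'
  have hit : i.toNat = t + 1 := by simp [i]
  have hi1 : (i - 1).toNat = t := by simp [i]
  have hjt : j.toNat = u + 1 := by simp [j]
  have hcv : c = cs.getD t 0 := by
    show PySem.List.pyGetD cs (i-1) 0 = _
    rw [PySem.List.pyGetD_of_nonneg cs 0 (by simp [i]), hi1]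
  have hcn : 0 ≤ c := hcv ▸ pvGetD_nonneg cs hc t
  have hjb : j ≤ budget := by simp only [j]; omega
  have hj0 : 0 < j := by simp only [j]; omega
  -- reads go to row t of dp, which equals row t of dp0, which holds pvM cs t
  have hread : ∀ jn, jn ≤ budget.toNat → pvDget dp t jn = pvM cs t (jn : Int) := by
    intro jn hjn
    rw [hother t (by omega) jn]
    exact h0.2.2.1 t le_rfl (by omega) jn hjn
  -- the written value is pvM cs (t+1) j
  have hMsucc : ∀ j', pvM cs (t+1) j' = if cs.getD t 0 ≤ j' then
      max (pvM cs t j') (pvM cs t (j' - cs.getD t 0) + cs.getD t 0) else pvM cs t j' :=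
    fun _ => rfl
  have hv : v = pvM cs (t+1) j := by
    show (if c ≤ j then
        max (pvDget dp (i-1).toNat j.toNat) (pvDget dp (i-1).toNat (j-c).toNat + c)
      else pvDget dp (i-1).toNat j.toNat) = _
    rw [hMsucc j, ← hcv, hi1, hjt]
    by_cases hcj : c ≤ j
    · have hjc0 : 0 ≤ j - c := by omega
      have hjcB : (j - c).toNat ≤ budget.toNat := by omega
      have hcast1 : ((u + 1 : Nat) : Int) = j := by simp [j]
      have hcast2 : (((j - c).toNat : Nat) : Int) = j - c := by omega
      rw [if_pos hcj, if_pos hcj, hread (u+1) (by omega), hread (j - c).toNat hjcB,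
        hcast1, hcast2]
    · rw [if_neg hcj, if_neg hcj, hread (u+1) (by omega),
        (by simp [j] : ((u+1:Nat):Int) = j)]
  -- sizes
  have hszt : t + 1 < dp.size := by omega
  have hsz' : dp'.size = cs.length + 1 := by simp [dp', Array.size_modify, hsz]
  have hrowsz : dp[t+1].size = budget.toNat + 1 := hrsz (t+1) hszt
  have hrsz' : ∀ r, (hr : r < dp'.size) → dp'[r].size = budget.toNat + 1 := by
    intro r hr
    have hr2 : r < dp.size := by omega
    show (dp.modify i.toNat _)[r].size = _
    rw [Array.getElem_modify (by simpa [Array.size_modify] using hr2)]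
    split
    · rw [Array.size_set!]
      exact hrsz r hr2
    · exact hrsz r hr2
  refine ⟨hsz', hrsz', ?_, ?_⟩
  · intro r hrne jn
    unfold pvDget
    by_cases hr : r < dp.size
    · have hr' : r < dp'.size := by omega
      have e1 : dp'.getD r #[] = dp'[r] := by
        rw [Array.getD_eq_getD_getElem?, Array.getElem?_eq_getElem hr', Option.getD_some]
      have e2 : dp.getD r #[] = dp[r] := by
        rw [Array.getD_eq_getD_getElem?, Array.getElem?_eq_getElem hr, Option.getD_some]
      have e3 : dp'[r] = dp[r] := by
        show (dp.modify i.toNat _)[r] = _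
        rw [Array.getElem_modify (by simpa [Array.size_modify] using hr)]
        rw [if_neg (by omega)]
      have h4 := hother r hrne jn
      unfold pvDget at h4
      rw [e1, e3, ← e2]
      exact h4
    · have e1 : dp'.getD r #[] = #[] := by
        rw [Array.getD_eq_getD_getElem?, Array.getElem?_eq_none (by omega), Option.getD_none]
      have e2 : dp.getD r #[] = #[] := by
        rw [Array.getD_eq_getD_getElem?, Array.getElem?_eq_none (by omega), Option.getD_none]
      have := hother r hrne jn
      unfold pvDget at this
      rw [e2] at this
      rw [e1, this]
  · intro jn hjn
    have hjn' : jn < budget.toNat + 1 := by omega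
    have ht1' : t + 1 < dp'.size := by omega
    have hs2 : jn < dp'[t+1].size := by rw [hrsz' (t+1) ht1']; omega
    have e1 : pvDget dp' (t+1) jn = dp'[t+1][jn] := pvDget_eq_getElem dp' (t+1) jn ht1' hs2
    have e2 : dp'[t+1] = dp[t+1].set! j.toNat v := by
      show (dp.modify i.toNat _)[t+1] = _
      rw [Array.getElem_modify (by simpa [Array.size_modify] using hszt)]
      rw [if_pos (by omega)]
    have e3 : (dp[t+1].set! j.toNat v)[jn]'(by rw [Array.size_set!, hrowsz]; exact hjn')
        = if j.toNat = jn then v else dp[t+1][jn]'(by rw [hrowsz]; exact hjn') := by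
      simp only [Array.set!_eq_setIfInBounds]
      exact Array.getElem_setIfInBounds (by rw [hrowsz]; exact hjn')
    rw [e1]
    simp only [e2]
    rw [e3]
    by_cases heq : j.toNat = jn
    · rw [if_pos heq, hv]
      rw [if_pos (by omega)]
      congr 1
      simp only [j] at heq ⊢
      omega
    · rw [if_neg heq]
      have e4 : dp[t+1][jn]'(by omega) = pvDget dp (t+1) jn := by
        rw [pvDget_eq_getElem dp (t+1) jn hszt (by omega)]
      rw [e4, hrow jn hjn]
      rw [hjt] at heq
      by_cases h1 : 1 ≤ jn ∧ jn ≤ u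
      · rw [if_pos h1, if_pos (by omega)]
      · rw [if_neg h1, if_neg (by omega)]

-- the inner loop fills row t+1 with pvM cs (t+1)
theorem pvInner_loop (cs : List Int) (budget : Int) (hb : 0 ≤ budget)
    (hc : ∀ c ∈ cs, 0 ≤ c) (t : Nat) (ht : t < cs.length) (dp0 : Array (Array Int))
    (h0 : pvTab cs budget t dp0) (u : Nat) (hu : u ≤ budget.toNat) :
    let i : Int := ((t : Int) + 1)
    let dp := (PySem.List.pyRange 1 ((u : Int)+1)).foldl (fun dp j =>
      let c := PySem.List.pyGetD cs (i-1) 0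
      let v := if c ≤ j then
          max (pvDget dp (i-1).toNat j.toNat) (pvDget dp (i-1).toNat (j-c).toNat + c)
        else pvDget dp (i-1).toNat j.toNat
      dp.modify i.toNat (fun row => row.set! j.toNat v)) dp0
    dp.size = cs.length + 1 ∧
    (∀ r, (hr : r < dp.size) → dp[r].size = budget.toNat + 1) ∧
    (∀ r, r ≠ t + 1 → ∀ jn, pvDget dp r jn = pvDget dp0 r jn) ∧
    (∀ jn, jn ≤ budget.toNat →
      pvDget dp (t+1) jn = if 1 ≤ jn ∧ jn ≤ u then pvM cs (t+1) (jn : Int) else 0) := by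
  intro i
  induction u with
  | zero =>
    rw [PySem.List.pyRange_one_eq_nil (show ((0:Nat):Int)+1 ≤ 1 by norm_num)]
    simp only [List.foldl_nil]
    refine ⟨h0.1, h0.2.1, ?_, ?_⟩
    · intro r _ jn
      trivial
    · intro jn hjn
      rw [if_neg (by omega)]
      exact h0.2.2.2 (t+1) (by omega) (by omega) jn
  | succ u ih =>
    have hu' : u ≤ budget.toNat := by omega
    obtain ⟨hsz, hrsz, hother, hrow⟩ := ih hu'
    have hsplit : PySem.List.pyRange 1 ((↑(u+1) : Int)+1)
        = PySem.List.pyRange 1 ((u : Int)+1) ++ [(u : Int)+1] := by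
      push_cast
      exact PySem.List.pyRange_one_succ_right (by omega)
    rw [hsplit, List.foldl_append, List.foldl_cons, List.foldl_nil]
    have hstep := pvInner_step cs budget hb hc t ht dp0 _ h0 hsz hrsz hother u (by omega) hrow
    exact hstep

-- the outer loop establishes the table invariant row by row
theorem pvOuter_loop (cs : List Int) (budget : Int) (hb : 0 ≤ budget)
    (hc : ∀ c ∈ cs, 0 ≤ c) (t : Nat) (ht : t ≤ cs.length) :
    pvTab cs budget t ((PySem.List.pyRange 1 ((t : Int)+1)).foldl (fun dp i =>
      (PySem.List.pyRange 1 (budget+1)).foldl (fun dp j =>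
        let c := PySem.List.pyGetD cs (i-1) 0
        let v := if c ≤ j then
            max (pvDget dp (i-1).toNat j.toNat) (pvDget dp (i-1).toNat (j-c).toNat + c)
          else pvDget dp (i-1).toNat j.toNat
        dp.modify i.toNat (fun row => row.set! j.toNat v)) dp)
      (Array.replicate (cs.length+1) (Array.replicate (budget+1).toNat 0))) := by
  induction t with
  | zero =>
    rw [PySem.List.pyRange_one_eq_nil (show ((0:Nat):Int)+1 ≤ 1 by norm_num)]
    simp only [List.foldl_nil]
    have hgz : ∀ r jn, pvDget (Array.replicate (cs.length+1)
        (Array.replicate (budget+1).toNat 0)) r jn = 0 := by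
      intro r jn
      unfold pvDget
      simp [Array.getD_eq_getD_getElem?, Array.getElem?_replicate]
      split <;> simp [Array.getD_eq_getD_getElem?, Array.getElem?_replicate]
      split <;> simp
    refine ⟨by simp, ?_, ?_, fun r _ _ jn => hgz r jn⟩
    · intro r hr
      simp only [Array.getElem_replicate, Array.size_replicate]
      omega
    · intro r hr0 hrl jn hjn
      interval_cases r
      rw [hgz 0 jn]
      rfl
  | succ t iht =>
    have ht' : t ≤ cs.length := by omega
    have hTab := iht ht'
    have hsplit : PySem.List.pyRange 1 ((↑(t+1) : Int)+1)
        = PySem.List.pyRange 1 ((t : Int)+1) ++ [(t : Int)+1] := by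
      push_cast
      exact PySem.List.pyRange_one_succ_right (by omega)
    rw [hsplit, List.foldl_append, List.foldl_cons, List.foldl_nil]
    have hBcast : ((budget.toNat : Int)) = budget := by omega
    have hloop := pvInner_loop cs budget hb hc t (by omega) _ hTab budget.toNat le_rfl
    rw [hBcast] at hloop
    obtain ⟨hsz, hrsz, hother, hrow⟩ := hloop
    refine ⟨hsz, hrsz, ?_, ?_⟩
    · intro r hr hrl jn hjn
      by_cases hr1 : r = t + 1
      · subst hr1
        rw [hrow jn hjn]
        by_cases hj1 : 1 ≤ jn
        · rw [if_pos ⟨hj1, hjn⟩]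
        · have : jn = 0 := by omega
          subst this
          rw [if_neg (by omega)]
          simp [pvM_zero cs hc (t+1)]
      · rw [hother r hr1 jn]
        exact hTab.2.2.1 r (by omega) hrl jn hjn
    · intro r hr hrl jn
      rw [hother r (by omega) jn]
      exact hTab.2.2.2 r (by omega) hrl jn

theorem pvFillA_spec (cs : List Int) (budget : Int) (hb : 0 ≤ budget)
    (hc : ∀ c ∈ cs, 0 ≤ c) (i : Nat) (hi : i ≤ cs.length) (jn : Nat) (hj : jn ≤ budget.toNat) :
    pvDget (pvFillA cs budget) i jn = pvM cs i (jn : Int) := by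
  have h := pvOuter_loop cs budget hb hc cs.length le_rfl
  have hcast : ((cs.length : Int)).toNat = cs.length := by omega
  unfold pvFillA
  simp only [hcast]
  exact h.2.2.1 i hi hi jn hj


theorem pvBestB_spec (rest : List Int) (budget : Int) (hb : 0 ≤ budget)
    (hc : ∀ c ∈ rest, 0 ≤ c) (i : Nat) (hi : i ≤ rest.length) (j : Int)
    (h0 : 0 ≤ j) (hj : j ≤ budget) :
    pvBestB (pvReachsB rest budget).1 (i : Int) j = pvM rest i j := by
  have hget : PySem.List.pyGetD (pvReachsB rest budget).1 (i : Int) [] = pvR rest budget i := by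
    rw [PySem.List.pyGetD_of_nonneg _ _ (by positivity), pvReachsB_eq]
    simp only [Int.toNat_natCast]
    rw [List.getD_eq_getElem?_getD, List.getElem?_map, List.getElem?_range (by omega)]
    rfl
  show (((PySem.List.pyGetD (pvReachsB rest budget).1 (i : Int) []).filter
      (fun s => s ≤ j)).max?).getD 0 = _
  rw [hget]
  exact (pvR_inv rest budget hb hc i).2.2 j h0 hj

theorem pvM_pick_le (cs : List Int) (i : Nat) (j : Int)
    (hne : pvM cs (i+1) j ≠ pvM cs i j) : cs.getD i 0 ≤ j := by
  by_contra hcj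
  exact hne (by simp only [pvM]; rw [if_neg hcj])

theorem pvBack_eq (rest : List Int) (budget : Int) (hb : 0 ≤ budget)
    (hc : ∀ c ∈ rest, 0 ≤ c) (i : Nat) (hi : i ≤ rest.length) (j : Int)
    (h0 : 0 ≤ j) (hj : j ≤ budget) (acc : List Int) :
    pvBackA (pvFillA rest budget) rest i j acc
      = pvBackB (pvReachsB rest budget).1 rest i j acc := by
  induction i generalizing j acc with
  | zero => rfl
  | succ i ih =>
    have hcast : ∀ (r : Nat), r ≤ rest.length → pvDget (pvFillA rest budget) r j.toNat
        = pvM rest r j := by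
      intro r hr
      rw [pvFillA_spec rest budget hb hc r hr j.toNat (by omega)]
      congr 1
      omega
    have hA1 := hcast (i+1) hi
    have hA0 := hcast i (by omega)
    have hB1 : pvBestB (pvReachsB rest budget).1 ((i : Int)+1) j = pvM rest (i+1) j := by
      rw [show ((i : Int)+1) = ((i+1 : Nat) : Int) by push_cast; ring]
      exact pvBestB_spec rest budget hb hc (i+1) hi j h0 hj
    have hB0 := pvBestB_spec rest budget hb hc i (by omega) j h0 hj
    simp only [pvBackA, pvBackB]
    by_cases hjp : j > 0
    · rw [if_pos hjp, if_pos hjp]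
      rw [hA1, hA0, hB1, hB0]
      by_cases hne : pvM rest (i+1) j ≠ pvM rest i j
      · rw [if_pos hne, if_pos hne]
        have hcj := pvM_pick_le rest i j hne
        have hcget : PySem.List.pyGetD rest (i : Int) 0 = rest.getD i 0 := by
          rw [PySem.List.pyGetD_of_nonneg _ _ (by positivity), Int.toNat_natCast]
        have hcn : 0 ≤ rest.getD i 0 := pvGetD_nonneg rest hc i
        apply ih (by omega) _ (by rw [hcget]; omega) (by rw [hcget]; omega)
      · rw [if_neg hne, if_neg hne]
        exact ih (by omega) j h0 hj _
    · rw [if_neg hjp, if_neg hjp]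

-- ===== VERDICT (by name: the statement is the Claim_ definition above) =====
theorem linear_payments_spec : Claim_equal_linear_payments := by
  intro costs hdom hpre
  unfold Spec_linear_payments
  simp only [linear_payments, linear_payments_alt, pvKnapA]
  -- both greedy loops compute pvScan costs 495000
  have hscanA : pvGreedyA costs costs 495000 = pvScan costs 495000 :=
    pvGreedyA_eq_scan costs 495000
  have hscanB := pvGloopB_aux costs 0 495000
  rw [List.drop_zero] at hscanB
  set S := pvScan costs 495000 with hS
  have hrest : ∀ c ∈ S.1, 0 ≤ c := pvScan_rest_nonneg_aux costs 495000 hpre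
  have hrem : 0 ≤ S.2 := pvScan_rem_nonneg costs 495000 (by norm_num)
  have hb : 0 ≤ 5000 + S.2 := by omega
  have hdropB : costs.drop (pvGloopB costs 0 495000).1 = S.1 := congrArg Prod.fst hscanB
  have hremB : (pvGloopB costs 0 495000).2 = S.2 := congrArg Prod.snd hscanB
  rw [hscanA, hdropB, hremB]
  have hn : ((S.1.length : Int)).toNat = S.1.length := by omega
  simp only [hn]
  -- the two backtracks agree
  have hback := pvBack_eq S.1 (5000 + S.2) hb hrest S.1.length le_rfl (5000 + S.2)
    hb le_rfl []
  obtain ⟨hbound, hpair⟩ := pvBackB_shape (pvReachsB S.1 (5000 + S.2)).1 S.1 S.1.length (5000 + S.2)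
  rw [hback]
  set I := pvBackB (pvReachsB S.1 (5000 + S.2)).1 S.1 S.1.length (5000 + S.2) [] with hI
  have hboundI : ∀ x ∈ I, 0 ≤ x ∧ x < (S.1.length : Int) := hbound
  -- sorted(desc) of a strictly decreasing list is itself; the guard in A's pop loop always holds
  rw [pvSorted_rev_indices I hpair, pvPops_eq I S.1 hpair hboundI]
  -- penalties agree
  have hpen : pvDget (pvFillA S.1 (5000 + S.2)) S.1.length ((5000 + S.2).toNat)
      = pvBestB (pvReachsB S.1 (5000 + S.2)).1 ((S.1.length : Int)) (5000 + S.2) := by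
    rw [pvFillA_spec S.1 (5000 + S.2) hb hrest S.1.length le_rfl _ le_rfl,
      pvBestB_spec S.1 (5000 + S.2) hb hrest S.1.length le_rfl _ hb le_rfl]
    congr 1
    omega
  rw [hpen]
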